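-- pv_equiv track=rewrite | github.com/5237-mests/Amharic-E-commerce-Data-Extractor | FIXER.PY | fix_first_i_loc_to_b_loc
-- ===== SOURCE A (Python) =====
-- def fix_first_i_loc_to_b_loc(conll_lines):
--     fixed_lines = []
--     first_i_loc_found = False
--
--     for line in conll_lines:
--         line = line.strip()
--
--         if line == "":
--             # End of sentence → reset
--             fixed_lines.append("")
--             first_i_loc_found = False
--             continue
--
--         parts = line.split()
--         if len(parts) != 2:
--             fixed_lines.append(line)
--             continue
--
--         token, tag = parts
--
--         if tag == "I-LOC" and not first_i_loc_found:
--             tag = "B-LOC"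
--             first_i_loc_found = True
--
--         fixed_lines.append(f"{token} {tag}")
--
--     return fixed_lines
-- ===== SOURCE B (Python) =====
-- # B: partition-based rewrite — strip once, split the line list into sentence
-- # blocks at blank lines, fix each block independently (find first I-LOC index,
-- # then render every line), and stitch the blocks back with the blanks.
--
-- def _render(line, flip):
--     parts = line.split()
--     if len(parts) != 2:
--         return line
--     return parts[0] + " " + ("B-LOC" if flip else parts[1])
--
--
-- def _first_i_loc(block):
--     for i, line in enumerate(block):
--         parts = line.split()
--         if len(parts) == 2 and parts[1] == "I-LOC":
--             return i
--     return -1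
--
--
-- def _fix_block(block):
--     j = _first_i_loc(block)
--     return [_render(line, i == j) for i, line in enumerate(block)]
--
--
-- def fix_first_i_loc_to_b_loc(conll_lines):
--     rest = [line.strip() for line in conll_lines]
--     out = []
--     while "" in rest:
--         k = rest.index("")
--         out.extend(_fix_block(rest[:k]))
--         out.append("")
--         rest = rest[k + 1:]
--     out.extend(_fix_block(rest))
--     return out
-- ===== Notes on version B (the rewrite author's own statement) =====
-- stated objective: alternative
-- what changed: Replaced the single stateful pass with a mutable first-I-LOC flag by a partition into sentence blocks at blank lines, each block fixed independently (find the first I-LOC index, then render all lines) and rejoined with the blanks.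
import Mathlib
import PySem

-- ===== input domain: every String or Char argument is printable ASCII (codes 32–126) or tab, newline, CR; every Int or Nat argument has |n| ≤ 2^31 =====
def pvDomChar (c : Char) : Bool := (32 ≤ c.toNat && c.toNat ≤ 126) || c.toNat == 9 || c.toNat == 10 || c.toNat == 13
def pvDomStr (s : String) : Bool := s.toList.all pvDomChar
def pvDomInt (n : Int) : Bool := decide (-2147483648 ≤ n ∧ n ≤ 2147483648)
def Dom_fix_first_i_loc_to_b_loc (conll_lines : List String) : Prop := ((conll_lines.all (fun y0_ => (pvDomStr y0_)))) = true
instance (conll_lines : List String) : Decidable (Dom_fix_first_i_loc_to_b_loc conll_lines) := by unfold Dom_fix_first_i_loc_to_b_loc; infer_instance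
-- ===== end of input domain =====

-- B partitions the lines into sentence blocks at blank lines and fixes each block
-- independently (find-first-I-LOC, then render), instead of A's stateful single pass.


-- ===== PORT A =====
-- A's loop over the lines with the mutable flag `first_i_loc_found`.
def pvGoA : List String → Bool → List String
  | [], _ => []
  | l :: rest, found =>
    let line := PySem.Str.strip l
    if line = "" then "" :: pvGoA rest false
    else
      let parts := PySem.Str.split₀ line
      if parts.length ≠ 2 then line :: pvGoA rest found
      else
        let token := parts.getD 0 ""
        let tag := parts.getD 1 ""
        if tag = "I-LOC" ∧ found = false then (token ++ " " ++ "B-LOC") :: pvGoA rest true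
        else (token ++ " " ++ tag) :: pvGoA rest found

def fix_first_i_loc_to_b_loc (conll_lines : List String) : List String :=
  pvGoA conll_lines false

-- ===== PORT B =====
-- _render(line, flip)
def pvRender (line : String) (flip : Bool) : String :=
  let parts := PySem.Str.split₀ line
  if parts.length ≠ 2 then line
  else parts.getD 0 "" ++ " " ++ (if flip then "B-LOC" else parts.getD 1 "")

-- _first_i_loc(block): index of the first "token I-LOC" line (none = Python's -1)
def pvFirstILoc : List String → Option Int
  | [] => none
  | l :: t =>
    let parts := PySem.Str.split₀ l
    if parts.length = 2 ∧ parts.getD 1 "" = "I-LOC" then some 0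
    else (pvFirstILoc t).map (· + 1)

-- _fix_block(block)
def pvFixBlock (block : List String) : List String :=
  let j := pvFirstILoc block
  (PySem.List.enumerate block).map (fun p => pvRender p.2 (decide (j = some p.1)))

-- the while-loop over `rest`, splitting at the first blank line
def pvGoB (rest : List String) : List String :=
  match hIdx : PySem.List.index? rest "" with
  | some k => pvFixBlock (rest.take k) ++ "" :: pvGoB (rest.drop (k + 1))
  | none => pvFixBlock rest
termination_by rest.length
decreasing_by
  rw [PySem.List.index?_eq_some_iff] at hIdx
  obtain ⟨pre, suf, hEq, -, -⟩ := hIdx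
  subst hEq; simp

def fix_first_i_loc_to_b_loc_alt (conll_lines : List String) : List String :=
  pvGoB (conll_lines.map PySem.Str.strip)

-- ===== PRECONDITION & SPEC =====
def Spec_fix_first_i_loc_to_b_loc (conll_lines : List String) (out : List String) : Prop := out = fix_first_i_loc_to_b_loc_alt conll_lines
instance (conll_lines : List String) (out : List String) : Decidable (Spec_fix_first_i_loc_to_b_loc conll_lines out) := by unfold Spec_fix_first_i_loc_to_b_loc; infer_instance

-- ===== CLAIM (what is proved, stated in full; the proofs are below) =====
def Claim_equal_fix_first_i_loc_to_b_loc : Prop := ∀ (conll_lines : List String), Dom_fix_first_i_loc_to_b_loc conll_lines → Spec_fix_first_i_loc_to_b_loc conll_lines (fix_first_i_loc_to_b_loc conll_lines)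

-- ===== LEMMAS AND PROOFS =====

-- proof helper: A's loop on already-stripped lines
def pvGoAS : List String → Bool → List String
  | [], _ => []
  | l :: rest, found =>
    if l = "" then "" :: pvGoAS rest false
    else
      let parts := PySem.Str.split₀ l
      if parts.length ≠ 2 then l :: pvGoAS rest found
      else
        let token := parts.getD 0 ""
        let tag := parts.getD 1 ""
        if tag = "I-LOC" ∧ found = false then (token ++ " " ++ "B-LOC") :: pvGoAS rest true
        else (token ++ " " ++ tag) :: pvGoAS rest found

theorem pvGoA_eq_goAS (ls : List String) (f : Bool) :
    pvGoA ls f = pvGoAS (ls.map PySem.Str.strip) f := by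
  induction ls generalizing f with
  | nil => rfl
  | cons l rest ih =>
    simp only [pvGoA, pvGoAS, List.map_cons]
    split_ifs <;> simp [ih]

theorem pvFirstILoc_nonneg (t : List String) (k : Int) (h : pvFirstILoc t = some k) : 0 ≤ k := by
  induction t generalizing k with
  | nil => simp [pvFirstILoc] at h
  | cons l t ih =>
    simp only [pvFirstILoc] at h
    split_ifs at h
    · injection h with h; omega
    · rw [Option.map_eq_some_iff] at h
      obtain ⟨m, hm, hk⟩ := h
      have := ih m hm
      omega

theorem pvEnum_shift {α : Type} (t : List α) (s : Int) :
    PySem.List.enumerate t (s + 1) = (PySem.List.enumerate t s).map (fun p => (p.1 + 1, p.2)) := by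
  induction t generalizing s with
  | nil => simp [PySem.List.enumerate_nil]
  | cons x t ih => simp [PySem.List.enumerate_cons, ih]

theorem pvFixBlock_cons (l : String) (t : List String) :
    pvFixBlock (l :: t) =
      pvRender l (decide (pvFirstILoc (l :: t) = some 0)) ::
        (if (PySem.Str.split₀ l).length = 2 ∧ (PySem.Str.split₀ l).getD 1 "" = "I-LOC"
         then t.map (fun x => pvRender x false)
         else pvFixBlock t) := by
  simp only [pvFixBlock, PySem.List.enumerate_cons, List.map_cons]
  rw [pvEnum_shift t 0, List.map_map]
  congr 1
  split_ifs with hp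
  · have hj : pvFirstILoc (l :: t) = some 0 := by
      simp only [pvFirstILoc]; rw [if_pos hp]
    conv_rhs => rw [← PySem.List.map_snd_enumerate t 0, List.map_map]
    apply List.map_congr_left
    intro p hp'
    rw [PySem.List.mem_enumerate_iff] at hp'
    obtain ⟨k, hk, rfl⟩ := hp'
    have hne : ¬ (pvFirstILoc (l :: t) = some ((k : Int) + 1)) := by
      rw [hj]; simp; omega
    simp [Function.comp, hne]
  · have hj : pvFirstILoc (l :: t) = (pvFirstILoc t).map (· + 1) := by
      simp only [pvFirstILoc]; rw [if_neg hp]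
    apply List.map_congr_left
    intro p hp'
    rw [PySem.List.mem_enumerate_iff] at hp'
    obtain ⟨k, hk, rfl⟩ := hp'
    simp only [Function.comp, hj]
    congr 1
    cases hm : pvFirstILoc t with
    | none => simp
    | some m =>
      simp only [Option.map_some, Option.some.injEq, decide_eq_decide]
      omega

-- with the flag already set, A rewrites nothing: each line renders with flip = false
theorem pvGoAS_true (block r : List String) (hb : ∀ x ∈ block, x ≠ "") :
    pvGoAS (block ++ r) true = block.map (fun x => pvRender x false) ++ pvGoAS r true := by
  induction block with
  | nil => simp
  | cons l t ih =>
    have hl : l ≠ "" := hb l (by simp)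
    have ht : ∀ x ∈ t, x ≠ "" := fun x hx => hb x (by simp [hx])
    simp only [List.cons_append, pvGoAS, if_neg hl, List.map_cons]
    by_cases h2 : (PySem.Str.split₀ l).length = 2 <;>
      simp [pvRender, h2, ih ht]

-- the key block lemma: A's scan over one blank-free block equals B's block fix
theorem pvGoAS_block (block r : List String) (hb : ∀ x ∈ block, x ≠ "") :
    pvGoAS (block ++ r) false = pvFixBlock block ++ pvGoAS r (pvFirstILoc block).isSome := by
  induction block with
  | nil => simp [pvFixBlock, PySem.List.enumerate_nil, pvFirstILoc]
  | cons l t ih =>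
    have hl : l ≠ "" := hb l (by simp)
    have ht : ∀ x ∈ t, x ≠ "" := fun x hx => hb x (by simp [hx])
    rw [pvFixBlock_cons]
    by_cases hp : (PySem.Str.split₀ l).length = 2 ∧ (PySem.Str.split₀ l).getD 1 "" = "I-LOC"
    · have hj : pvFirstILoc (l :: t) = some 0 := by
        simp only [pvFirstILoc]; rw [if_pos hp]
      simp only [List.cons_append, pvGoAS, if_neg hl]
      rw [if_pos hp, hj]
      rw [if_neg (by simp [hp.1] : ¬ (PySem.Str.split₀ l).length ≠ 2)]
      rw [if_pos (show (PySem.Str.split₀ l).getD 1 "" = "I-LOC" ∧ True from ⟨hp.2, trivial⟩)]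
      rw [pvGoAS_true t r ht]
      simp [pvRender, hp.1]
    · have hj : pvFirstILoc (l :: t) = (pvFirstILoc t).map (· + 1) := by
        simp only [pvFirstILoc]; rw [if_neg hp]
      have hj0 : ¬ (pvFirstILoc (l :: t) = some 0) := by
        rw [hj]
        cases hk : pvFirstILoc t with
        | none => simp
        | some m => have := pvFirstILoc_nonneg t m hk; simp; omega
      rw [if_neg hp]
      simp only [List.cons_append, pvGoAS, if_neg hl]
      by_cases h2 : (PySem.Str.split₀ l).length = 2
      · have htag : (PySem.Str.split₀ l).getD 1 "" ≠ "I-LOC" := fun h => hp ⟨h2, h⟩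
        rw [if_neg (by simp [h2] : ¬ ¬ (PySem.Str.split₀ l).length = 2)]
        rw [if_neg (show ¬ ((PySem.Str.split₀ l).getD 1 "" = "I-LOC" ∧ True) from fun h => htag h.1)]
        rw [ih ht]
        simp only [pvRender, h2, hj, Option.isSome_map]
        simp [h2]
        intro x hx hx1
        have := pvFirstILoc_nonneg t x hx
        omega
      · rw [if_pos (by simp [h2] : (PySem.Str.split₀ l).length ≠ 2)]
        rw [ih ht]
        simp [pvRender, h2, hj, Option.isSome_map]

theorem pvGoB_some (rest : List String) (k : Nat) (h : PySem.List.index? rest "" = some k) :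
    pvGoB rest = pvFixBlock (rest.take k) ++ "" :: pvGoB (rest.drop (k + 1)) := by
  rw [pvGoB]
  split
  · rename_i k' h'
    rw [h] at h'
    cases h'
    rfl
  · rename_i h'
    rw [h] at h'
    cases h'

theorem pvGoB_none (rest : List String) (h : PySem.List.index? rest "" = none) :
    pvGoB rest = pvFixBlock rest := by
  rw [pvGoB]
  split
  · rename_i k' h'
    rw [h] at h'
    cases h'
  · rfl

theorem pvGoAS_eq_goB (s : List String) : pvGoAS s false = pvGoB s := by
  induction s using pvGoB.induct with
  | case1 rest k h ih =>
    rw [pvGoB_some rest k h]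
    rw [PySem.List.index?_eq_some_iff] at h
    obtain ⟨pre, suf, rfl, hLen, hpre⟩ := h
    have hpre' : ∀ x ∈ pre, x ≠ "" := fun x hx he => hpre (he ▸ hx)
    have htake : (pre ++ "" :: suf).take k = pre := by rw [← hLen]; simp
    have hdrop : (pre ++ "" :: suf).drop (k + 1) = suf := by
      rw [← hLen]; simp [List.drop_append]
    rw [htake, hdrop]
    rw [hdrop] at ih
    have hstep : pvGoAS ("" :: suf) ((pvFirstILoc pre).isSome) = "" :: pvGoAS suf false := by
      simp [pvGoAS]
    calc pvGoAS (pre ++ "" :: suf) false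
        = pvFixBlock pre ++ pvGoAS ("" :: suf) ((pvFirstILoc pre).isSome) :=
          pvGoAS_block pre ("" :: suf) hpre'
      _ = pvFixBlock pre ++ "" :: pvGoB suf := by rw [hstep, ih]
  | case2 rest h =>
    rw [pvGoB_none rest h]
    rw [PySem.List.index?_eq_none_iff] at h
    have : pvGoAS (rest ++ []) false = pvFixBlock rest ++ pvGoAS [] ((pvFirstILoc rest).isSome) :=
      pvGoAS_block rest [] (fun x hx he => h (he ▸ hx))
    simpa [pvGoAS] using this

-- ===== VERDICT (by name: the statement is the Claim_ definition above) =====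
theorem fix_first_i_loc_to_b_loc_spec : Claim_equal_fix_first_i_loc_to_b_loc := by
  intro conll_lines _
  unfold Spec_fix_first_i_loc_to_b_loc fix_first_i_loc_to_b_loc fix_first_i_loc_to_b_loc_alt
  rw [pvGoA_eq_goAS, pvGoAS_eq_goB]
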